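-- pv_equiv track=rewrite | github.com/Elggi/chrono_pendulum | src/preprocessing/segmentation.py | extract_contiguous_segments
-- ===== SOURCE A (Python) =====
-- from typing import Iterable
--
-- def extract_contiguous_segments(mask: Iterable[bool], min_samples: int) -> list[tuple[int, int]]:
--     """Extract contiguous True spans as [start, end) index segments."""
--     values = list(mask)
--     spans: list[tuple[int, int]] = []
--     start = None
--     for idx, flag in enumerate(values):
--         if flag and start is None:
--             start = idx
--         if (not flag) and start is not None:
--             if idx - start >= min_samples:
--                 spans.append((start, idx))
--             start = None
--     if start is not None:
--         end = len(values)
--         if end - start >= min_samples: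
--             spans.append((start, end))
--     return spans
-- ===== SOURCE B (Python) =====
-- def extract_contiguous_segments(mask, min_samples):
--     """Extract contiguous True spans as [start, end) index segments via edge detection:
--     find rising and falling edges in staged passes, zip them into spans, filter by length."""
--     values = [bool(v) for v in mask]
--     rises = [i for i, (prev, cur) in enumerate(zip([False] + values, values)) if cur and not prev]
--     falls = [i + 1 for i, (cur, nxt) in enumerate(zip(values, values[1:] + [False])) if cur and not nxt]
--     return [(s, e) for s, e in zip(rises, falls) if e - s >= min_samples]
-- ===== Notes on version B (the rewrite author's own statement) =====
-- stated objective: alternative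
-- what changed: Replaces A's single-pass start/None state machine with staged edge detection: one pass marks rising edges, one marks falling edges, then the two edge lists are zipped into spans and filtered by length.
import Mathlib
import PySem

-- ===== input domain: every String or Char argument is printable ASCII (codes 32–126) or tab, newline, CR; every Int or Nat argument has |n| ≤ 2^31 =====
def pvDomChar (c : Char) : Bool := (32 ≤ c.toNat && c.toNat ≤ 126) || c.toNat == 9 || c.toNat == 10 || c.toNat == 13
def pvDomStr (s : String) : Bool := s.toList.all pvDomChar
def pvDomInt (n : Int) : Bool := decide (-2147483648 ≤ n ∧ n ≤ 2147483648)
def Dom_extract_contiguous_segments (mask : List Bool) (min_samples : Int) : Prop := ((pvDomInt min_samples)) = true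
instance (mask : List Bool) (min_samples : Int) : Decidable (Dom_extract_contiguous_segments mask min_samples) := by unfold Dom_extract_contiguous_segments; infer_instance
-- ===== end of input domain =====

-- B replaces A's single-pass start/None state machine with staged edge detection:
-- rising-edge and falling-edge passes, zipped into spans and filtered by length
-- (objective: alternative).

-- ===== PORT A =====
-- A's for-loop: state (spans, start), one element at a time, the index carried explicitly
def aLoop (min_samples : Int) (xs : List Bool) (idx : Int)
    (spans : List (Int × Int)) (start : Option Int) : List (Int × Int) × Option Int :=
  match xs with
  | [] => (spans, start)
  | flag :: rest =>
    let start1 := if flag && start.isNone then some idx else start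
    if (!flag) && start1.isSome then
      aLoop min_samples rest (idx + 1)
        (if idx - start1.getD 0 ≥ min_samples then spans ++ [(start1.getD 0, idx)] else spans)
        none
    else
      aLoop min_samples rest (idx + 1) spans start1

def extract_contiguous_segments (mask : List Bool) (min_samples : Int) : List (Int × Int) :=
  let values := mask
  let r := aLoop min_samples values 0 [] none
  match r.2 with
  | some s =>
      if (values.length : Int) - s ≥ min_samples then r.1 ++ [(s, (values.length : Int))] else r.1
  | none => r.1

-- ===== PORT B =====
-- Source B: enumerate over the pairwise zips, filter the edges, zip rises with falls
def extract_contiguous_segments_alt (mask : List Bool) (min_samples : Int) : List (Int × Int) :=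
  let values := mask
  let rises := ((PySem.List.enumerate ((false :: values).zip values) 0).filter
      (fun p => p.2.2 && !p.2.1)).map (fun p => p.1)
  let falls := ((PySem.List.enumerate (values.zip (values.drop 1 ++ [false])) 0).filter
      (fun p => p.2.1 && !p.2.2)).map (fun p => p.1 + 1)
  (rises.zip falls).filter (fun p => decide (p.2 - p.1 ≥ min_samples))

-- ===== PRECONDITION & SPEC =====
def Spec_extract_contiguous_segments (mask : List Bool) (min_samples : Int) (out : List (Int × Int)) : Prop := out = extract_contiguous_segments_alt mask min_samples
instance (mask : List Bool) (min_samples : Int) (out : List (Int × Int)) : Decidable (Spec_extract_contiguous_segments mask min_samples out) := by unfold Spec_extract_contiguous_segments; infer_instance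

-- ===== CLAIM (what is proved, stated in full; the proofs are below) =====
def Claim_equal_extract_contiguous_segments : Prop := ∀ (mask : List Bool) (min_samples : Int), Dom_extract_contiguous_segments mask min_samples → Spec_extract_contiguous_segments mask min_samples (extract_contiguous_segments mask min_samples)

-- ===== LEMMAS AND PROOFS =====

-- structural form of B's rising-edge list (prev = value before xs, idx = absolute index)
def risesAux (prev : Bool) (xs : List Bool) (idx : Int) : List Int :=
  match xs with
  | [] => []
  | x :: t => (if x && !prev then [idx] else []) ++ risesAux x t (idx + 1)

-- structural form of B's falling-edge list (emits end = idx+1 at the last True of a run)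
def fallsAux (xs : List Bool) (idx : Int) : List Int :=
  match xs with
  | [] => []
  | x :: t => (if x && !(t.headD false) then [idx + 1] else []) ++ fallsAux t (idx + 1)

-- run decomposition used as the bridge between the two ports
def bGroups (min_samples : Int) (xs : List Bool) (start : Int) : List (Int × Int) :=
  match xs with
  | [] => []
  | x :: rest0 =>
    let length : Int := ((x :: rest0).takeWhile (· == x)).length
    (if x && decide (length ≥ min_samples) then [(start, start + length)] else []) ++
      bGroups min_samples ((x :: rest0).dropWhile (· == x)) (start + length)
termination_by xs.length
decreasing_by
  simp only [List.dropWhile_cons, BEq.rfl, if_true]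
  have := List.length_dropWhile_le (· == x) rest0
  simp only [List.length_cons]
  omega

-- A's post-loop flush, as a function of the loop's final state
def finishA (m endIdx : Int) (r : List (Int × Int) × Option Int) : List (Int × Int) :=
  match r.2 with
  | some s => if endIdx - s ≥ m then r.1 ++ [(s, endIdx)] else r.1
  | none => r.1

lemma extract_eq_finish (mask : List Bool) (m : Int) :
    extract_contiguous_segments mask m
      = finishA m (mask.length : Int) (aLoop m mask 0 [] none) := rfl

-- a leading False contributes nothing; its run merges into the offset
lemma bGroups_cons_false (m : Int) (t : List Bool) (idx : Int) :
    bGroups m (false :: t) idx = bGroups m t (idx + 1) := by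
  rw [bGroups]
  simp only [Bool.false_and, List.takeWhile_cons, List.dropWhile_cons]
  cases t with
  | nil => simp [bGroups]
  | cons b t2 =>
    cases b with
    | false =>
      rw [bGroups]
      simp only [Bool.false_and, List.takeWhile_cons, List.dropWhile_cons]
      norm_num
      ring_nf
    | true =>
      simp

-- A's loop = run decomposition: both loop states (start = None / start = some s) at once
lemma main_inv (m : Int) (xs : List Bool) :
    (∀ idx spans, finishA m (idx + xs.length) (aLoop m xs idx spans none)
        = spans ++ bGroups m xs idx)
    ∧ (∀ idx s spans, finishA m (idx + xs.length) (aLoop m xs idx spans (some s))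
        = spans
          ++ (if idx + ((xs.takeWhile (· == true)).length : Int) - s ≥ m
              then [(s, idx + ((xs.takeWhile (· == true)).length : Int))] else [])
          ++ bGroups m (xs.dropWhile (· == true))
               (idx + ((xs.takeWhile (· == true)).length : Int))) := by
  induction xs with
  | nil =>
    constructor
    · intro idx spans; simp [aLoop, finishA, bGroups]
    · intro idx s spans
      simp only [aLoop, finishA, List.takeWhile_nil, List.dropWhile_nil, List.length_nil,
        Nat.cast_zero, add_zero, bGroups, List.append_nil]
      split_ifs <;> simp
  | cons x t ih =>
    obtain ⟨ihL, ihT⟩ := ih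
    constructor
    · intro idx spans
      cases x with
      | false =>
        simp only [aLoop]
        norm_num
        have h1 : idx + ((t.length : Int) + 1) = idx + 1 + (t.length : Int) := by ring
        rw [h1, ihL, bGroups_cons_false]
      | true =>
        simp only [aLoop]
        norm_num
        have h1 : idx + ((t.length : Int) + 1) = idx + 1 + (t.length : Int) := by ring
        rw [h1, ihT, bGroups]
        simp only [List.takeWhile_cons, List.dropWhile_cons, if_true,
          List.length_cons, Bool.true_and, beq_true, decide_eq_true_eq]
        norm_num
        have h2 : idx + 1 + ((t.takeWhile (fun x => x)).length : Int) - idx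
            = ((t.takeWhile (fun x => x)).length : Int) + 1 := by ring
        have h3 : idx + 1 + ((t.takeWhile (fun x => x)).length : Int)
            = idx + (((t.takeWhile (fun x => x)).length : Int) + 1) := by ring
        rw [h2, h3]
    · intro idx s spans
      cases x with
      | false =>
        simp only [aLoop]
        norm_num
        have h1 : idx + ((t.length : Int) + 1) = idx + 1 + (t.length : Int) := by ring
        rw [h1, ihL, bGroups_cons_false]
        split_ifs <;> simp
      | true =>
        simp only [aLoop]
        norm_num
        have h1 : idx + ((t.length : Int) + 1) = idx + 1 + (t.length : Int) := by ring
        rw [h1, ihT]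
        simp only [beq_true]
        have h2 : idx + 1 + ((t.takeWhile (fun x => x)).length : Int)
            = idx + (((t.takeWhile (fun x => x)).length : Int) + 1) := by ring
        rw [h2]
        simp [List.append_assoc]

-- B's enumerate/filter/map rising-edge pass = risesAux
lemma rises_eq (xs : List Bool) : ∀ (prev : Bool) (s : Int),
    ((PySem.List.enumerate ((prev :: xs).zip xs) s).filter
        (fun p => p.2.2 && !p.2.1)).map (fun p => p.1)
      = risesAux prev xs s := by
  induction xs with
  | nil => intro prev s; simp [risesAux, PySem.List.enumerate_nil]
  | cons x t ih =>
    intro prev s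
    simp only [List.zip_cons_cons, PySem.List.enumerate_cons, List.filter_cons, risesAux]
    by_cases h : (x && !prev) = true <;> simp [h, ih]

-- B's enumerate/filter/map falling-edge pass = fallsAux
lemma falls_eq (xs : List Bool) : ∀ (s : Int),
    ((PySem.List.enumerate (xs.zip (xs.drop 1 ++ [false])) s).filter
        (fun p => p.2.1 && !p.2.2)).map (fun p => p.1 + 1)
      = fallsAux xs s := by
  induction xs with
  | nil => intro s; simp [fallsAux, PySem.List.enumerate_nil]
  | cons x t ih =>
    intro s
    have hz : (x :: t).zip ((x :: t).drop 1 ++ [false])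
        = (x, t.headD false) :: t.zip (t.drop 1 ++ [false]) := by
      cases t <;> simp
    rw [hz]
    simp only [PySem.List.enumerate_cons, List.filter_cons, fallsAux]
    have ih' := ih (s + 1)
    rw [List.drop_one] at ih'
    by_cases h : x = true ∧ t.head?.getD false = false <;> simp [h, ih']

-- inside a run of Trues, the next rising edge is past the run
lemma risesAux_true (t : List Bool) : ∀ (idx : Int),
    risesAux true t idx
      = risesAux false (t.dropWhile (· == true)) (idx + ((t.takeWhile (· == true)).length : Int)) := by
  induction t with
  | nil => intro idx; simp [risesAux]
  | cons x u ih =>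
    intro idx
    cases x with
    | false =>
      simp only [risesAux, List.dropWhile_cons, List.takeWhile_cons]
      norm_num
      simp [risesAux]
    | true =>
      simp only [risesAux, List.dropWhile_cons, List.takeWhile_cons]
      norm_num
      rw [ih]
      have hp : (fun x : Bool => x == true) = (fun x : Bool => x) := by
        funext b; cases b <;> simp
      rw [hp]
      ring_nf

-- a run of Trues emits exactly one falling edge, at its end
lemma fallsAux_true (t : List Bool) : ∀ (idx : Int),
    fallsAux (true :: t) idx
      = (idx + 1 + ((t.takeWhile (· == true)).length : Int))
        :: fallsAux (t.dropWhile (· == true)) (idx + 1 + ((t.takeWhile (· == true)).length : Int)) := by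
  induction t with
  | nil => intro idx; simp [fallsAux]
  | cons x u ih =>
    intro idx
    cases x with
    | false =>
      simp only [fallsAux, List.dropWhile_cons, List.takeWhile_cons]
      norm_num
      simp [fallsAux]
    | true =>
      have h1 : fallsAux (true :: true :: u) idx = fallsAux (true :: u) (idx + 1) := by
        simp [fallsAux]
      rw [h1, ih]
      simp only [List.takeWhile_cons, List.dropWhile_cons]
      norm_num
      constructor <;> ring_nf

-- zipping the edge lists and filtering by length = the run decomposition
lemma zip_filter_eq_bGroups_aux (m : Int) : ∀ (n : Nat) (xs : List Bool), xs.length = n →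
    ∀ (idx : Int),
    ((risesAux false xs idx).zip (fallsAux xs idx)).filter
        (fun p => decide (p.2 - p.1 ≥ m))
      = bGroups m xs idx := by
  intro n
  induction n using Nat.strong_induction_on with
  | _ n IH =>
  intro xs hn idx
  cases xs with
  | nil => simp [risesAux, fallsAux, bGroups]
  | cons x t =>
    simp only [List.length_cons] at hn
    cases x with
    | false =>
      have h1 : risesAux false (false :: t) idx = risesAux false t (idx + 1) := by
        simp [risesAux]
      have h2 : fallsAux (false :: t) idx = fallsAux t (idx + 1) := by
        simp [fallsAux]
      rw [h1, h2, bGroups_cons_false]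
      exact IH t.length (by omega) t rfl (idx + 1)
    | true =>
      have hp : (fun x : Bool => x == true) = (fun x : Bool => x) := by
        funext b; cases b <;> simp
      have h1 : risesAux false (true :: t) idx
          = idx :: risesAux false (t.dropWhile (fun x => x))
              (idx + 1 + ((t.takeWhile (fun x => x)).length : Int)) := by
        simp only [risesAux]
        rw [risesAux_true, hp]
        norm_num
      have h2 := fallsAux_true t idx
      rw [hp] at h2
      rw [h1, h2, bGroups]
      simp only [List.takeWhile_cons, List.dropWhile_cons, if_true,
        List.length_cons, Bool.true_and, List.zip_cons_cons, List.filter_cons, beq_true]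
      have hrec := IH (t.dropWhile (fun x => x)).length
        (by have := List.length_dropWhile_le (fun x : Bool => x) t; omega)
        (t.dropWhile (fun x => x)) rfl (idx + 1 + ((t.takeWhile (fun x => x)).length : Int))
      have harith : idx + (((t.takeWhile (fun x : Bool => x)).length : Int) + 1)
          = idx + 1 + ((t.takeWhile (fun x : Bool => x)).length : Int) := by ring
      by_cases h : idx + 1 + ((t.takeWhile (fun x : Bool => x)).length : Int) - idx ≥ m
      · have h' : ((t.takeWhile (fun x : Bool => x)).length : Int) + 1 ≥ m := by omega
        simp [h, h', hrec, harith]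
      · have h' : ¬ (((t.takeWhile (fun x : Bool => x)).length : Int) + 1 ≥ m) := by omega
        simp [h, h', hrec, harith]

lemma zip_filter_eq_bGroups (m : Int) (xs : List Bool) (idx : Int) :
    ((risesAux false xs idx).zip (fallsAux xs idx)).filter
        (fun p => decide (p.2 - p.1 ≥ m))
      = bGroups m xs idx :=
  zip_filter_eq_bGroups_aux m xs.length xs rfl idx

-- ===== VERDICT (by name: the statement is the Claim_ definition above) =====
theorem extract_contiguous_segments_spec : Claim_equal_extract_contiguous_segments := by
  intro mask m _
  unfold Spec_extract_contiguous_segments extract_contiguous_segments_alt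
  rw [extract_eq_finish]
  have hA := (main_inv m mask).1 0 []
  simp only [zero_add, List.nil_append] at hA
  rw [hA, ← zip_filter_eq_bGroups m mask 0, ← rises_eq mask false 0, ← falls_eq mask 0]
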